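-- pv_equiv track=rewrite | github.com/rohitpmore/agentic-ai | assignments/assignment-5/travel_agent_system/agents/itinerary_agent.py | _create_packing_list
-- ===== SOURCE A (Python) =====
-- from typing import Dict, Any, Optional, List
--
-- def _create_packing_list(weather_data: Dict[str, Any],
--                        daily_plans: List[Dict[str, Any]]) -> List[str]:
--     """Create packing list based on weather and planned activities."""
--
--     packing_list = []
--
--     # Weather-based items
--     if weather_data.get("packing_suggestions"):
--         packing_list.extend(weather_data["packing_suggestions"])
--
--     # Activity-based items
--     activity_types = set()
--     for plan in daily_plans:
--         for period in ["morning", "afternoon", "evening"]: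
--             for activity in plan.get(period, []):
--                 activity_types.add(activity.get("type", "general"))
--
--     if "cultural" in activity_types:
--         packing_list.append("Modest clothing for cultural sites")
--     if "outdoor" in activity_types or "sightseeing" in activity_types:
--         packing_list.extend(["Comfortable walking shoes", "Small backpack for day trips"])
--
--     # Essential items
--     essentials = [
--         "Travel documents and copies",
--         "Phone charger and power adapter",
--         "Basic first aid kit",
--         "Reusable water bottle",
--         "Camera or smartphone for photos"
--     ]
--
--     packing_list.extend(essentials)
--
--     # Remove duplicates while preserving order
--     seen = set()
--     unique_packing_list = []
--     for item in packing_list: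
--         if item not in seen:
--             seen.add(item)
--             unique_packing_list.append(item)
--
--     return unique_packing_list
-- ===== SOURCE B (Python) =====
-- from typing import Dict, Any, List
--
-- def _dedup(items):
--     """Dedup by repeated filtering: emit the head, strip its duplicates from the rest."""
--     out = []
--     while items:
--         head = items[0]
--         out.append(head)
--         items = [x for x in items[1:] if x != head]
--     return out
--
-- def _create_packing_list(weather_data: Dict[str, Any],
--                        daily_plans: List[Dict[str, Any]]) -> List[str]:
--     """Create packing list based on weather and planned activities."""
--
--     # One pass over the planned activities maintaining two boolean flags
--     # (no intermediate set of activity types).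
--     has_cultural = False
--     has_walking = False
--     for plan in daily_plans:
--         for period in ("morning", "afternoon", "evening"):
--             for a in plan.get(period, []):
--                 t = a.get("type", "general")
--                 has_cultural = has_cultural or t == "cultural"
--                 has_walking = has_walking or t in ("outdoor", "sightseeing")
--
--     packing_list = list(weather_data.get("packing_suggestions") or [])
--     if has_cultural:
--         packing_list.append("Modest clothing for cultural sites")
--     if has_walking:
--         packing_list += ["Comfortable walking shoes", "Small backpack for day trips"]
--     packing_list += [
--         "Travel documents and copies",
--         "Phone charger and power adapter",
--         "Basic first aid kit",
--         "Reusable water bottle",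
--         "Camera or smartphone for photos",
--     ]
--
--     return _dedup(packing_list)
-- ===== Notes on version B (the rewrite author's own statement) =====
-- stated objective: alternative
-- what changed: B maintains two boolean flags in one pass over the activities instead of building A's intermediate set of activity types, and deduplicates by repeated filtering (emit the head, filter its duplicates out of the rest) instead of A's seen-set accumulator loop.
import Mathlib
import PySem

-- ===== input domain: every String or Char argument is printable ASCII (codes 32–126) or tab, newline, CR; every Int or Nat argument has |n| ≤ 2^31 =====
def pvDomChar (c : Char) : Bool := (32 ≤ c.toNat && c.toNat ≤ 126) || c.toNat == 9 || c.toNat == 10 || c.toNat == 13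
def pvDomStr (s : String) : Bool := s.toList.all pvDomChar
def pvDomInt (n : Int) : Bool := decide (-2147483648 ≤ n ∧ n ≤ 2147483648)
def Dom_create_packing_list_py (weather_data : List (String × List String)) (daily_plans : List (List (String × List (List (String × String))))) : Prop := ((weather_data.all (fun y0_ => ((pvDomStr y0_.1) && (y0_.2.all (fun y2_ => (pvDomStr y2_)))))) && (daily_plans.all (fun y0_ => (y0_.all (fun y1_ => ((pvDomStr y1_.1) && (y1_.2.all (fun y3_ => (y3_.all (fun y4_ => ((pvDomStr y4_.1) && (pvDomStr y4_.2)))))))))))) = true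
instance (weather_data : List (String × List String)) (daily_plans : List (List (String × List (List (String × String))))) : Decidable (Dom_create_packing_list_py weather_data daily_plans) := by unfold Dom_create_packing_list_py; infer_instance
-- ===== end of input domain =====

-- B replaces A's intermediate activity-type set by two boolean flags maintained in one pass over
-- the activities, and A's seen-set dedup loop by a repeated-filter dedup loop (emit head, filter its duplicates from the rest); objective: alternative.

-- ===== PORT A =====
def pvEssentials : List String :=
  ["Travel documents and copies", "Phone charger and power adapter", "Basic first aid kit",
   "Reusable water bottle", "Camera or smartphone for photos"]

def create_packing_list_py (weather_data : List (String × List String)) (daily_plans : List (List (String × List (List (String × String))))) : List String :=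
  -- if weather_data.get("packing_suggestions"): packing_list.extend(...)
  let packing0 : List String :=
    match PySem.Dict.get? (PySem.Dict.mk weather_data) "packing_suggestions" with
    | some v => if (v : List String).isEmpty then [] else v   -- empty list is falsy
    | none => []
  -- activity_types built by the triple nested loop
  let atys : PySem.Set String :=
    daily_plans.foldl (fun s plan =>
      (["morning", "afternoon", "evening"] : List String).foldl (fun s period =>
        (PySem.Dict.getD (PySem.Dict.mk plan) period []).foldl (fun s activity =>
          PySem.Set.add s (PySem.Dict.getD (PySem.Dict.mk activity) "type" "general")) s) s) PySem.Set.empty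
  let pl1 := if "cultural" ∈ atys then packing0 ++ ["Modest clothing for cultural sites"] else packing0
  let pl2 := if ("outdoor" ∈ atys ∨ "sightseeing" ∈ atys) then
               pl1 ++ ["Comfortable walking shoes", "Small backpack for day trips"] else pl1
  let pl3 := pl2 ++ pvEssentials
  -- seen-set dedup loop
  (pl3.foldl (fun (p : PySem.Set String × List String) item =>
      if item ∈ p.1 then p else (PySem.Set.add p.1 item, p.2 ++ [item]))
    (PySem.Set.empty, [])).2

-- ===== PORT B =====
-- dedup by repeated filtering: emit the head, strip its duplicates from the rest
def pvDedupLoop (out : List String) : List String → List String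
  | [] => out
  | h :: t => pvDedupLoop (out ++ [h]) (t.filter (fun x => x ≠ h))
termination_by l => l.length
decreasing_by
  simp only [List.length_cons, List.length_unattach]
  exact Nat.lt_succ_of_le (le_trans (List.length_filter_le _ _) (by simp))

def create_packing_list_py_alt (weather_data : List (String × List String)) (daily_plans : List (List (String × List (List (String × String))))) : List String :=
  -- one pass over the planned activities maintaining two boolean flags
  let flags : Bool × Bool :=
    daily_plans.foldl (fun st plan =>
      (["morning", "afternoon", "evening"] : List String).foldl (fun st period =>
        (PySem.Dict.getD (PySem.Dict.mk plan) period []).foldl (fun (st : Bool × Bool) a =>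
          let t := PySem.Dict.getD (PySem.Dict.mk a) "type" "general"
          (st.1 || t == "cultural", st.2 || (t == "outdoor" || t == "sightseeing"))) st) st)
      (false, false)
  let packing0 : List String :=
    match PySem.Dict.get? (PySem.Dict.mk weather_data) "packing_suggestions" with
    | some v => if (v : List String).isEmpty then [] else v   -- 'x or []' truthiness on a list value
    | none => []
  let pl1 := if flags.1 then packing0 ++ ["Modest clothing for cultural sites"] else packing0
  let pl2 := if flags.2 then pl1 ++ ["Comfortable walking shoes", "Small backpack for day trips"] else pl1
  pvDedupLoop [] (pl2 ++ pvEssentials)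

-- ===== PRECONDITION & SPEC =====
def Spec_create_packing_list_py (weather_data : List (String × List String)) (daily_plans : List (List (String × List (List (String × String))))) (out : List String) : Prop := out = create_packing_list_py_alt weather_data daily_plans
instance (weather_data : List (String × List String)) (daily_plans : List (List (String × List (List (String × String))))) (out : List String) : Decidable (Spec_create_packing_list_py weather_data daily_plans out) := by unfold Spec_create_packing_list_py; infer_instance

-- ===== CLAIM (what is proved, stated in full; the proofs are below) =====
def Claim_equal_create_packing_list_py : Prop := ∀ (weather_data : List (String × List String)) (daily_plans : List (List (String × List (List (String × String))))), Dom_create_packing_list_py weather_data daily_plans → Spec_create_packing_list_py weather_data daily_plans (create_packing_list_py weather_data daily_plans)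

-- ===== LEMMAS AND PROOFS =====

-- A's seen-set dedup loop: both components track the same list.
theorem dedup_loop_eq (pl : List String) (s : PySem.Set String) :
    (pl.foldl (fun (p : PySem.Set String × List String) item =>
        if item ∈ p.1 then p else (PySem.Set.add p.1 item, p.2 ++ [item])) (s, s)).2
      = pl.foldl PySem.Set.add s := by
  induction pl generalizing s with
  | nil => rfl
  | cons x xs ih =>
    simp only [List.foldl_cons]
    by_cases h : x ∈ s
    · simp [h, ih]
    · simp [h, ih]

-- A's dedup loop from the empty state computes list(dict.fromkeys(...)).
theorem dedup_loop_spec (pl : List String) :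
    (pl.foldl (fun (p : PySem.Set String × List String) item =>
        if item ∈ p.1 then p else (PySem.Set.add p.1 item, p.2 ++ [item]))
      (PySem.Set.empty, ([] : List String))).2 = PySem.List.dedup pl := by
  have h := dedup_loop_eq pl ([] : PySem.Set String)
  simpa [PySem.Set.empty, PySem.List.dedup_eq_ofList, PySem.Set.ofList_eq_foldl] using h

-- cons a fresh head through the Set.add fold
theorem foldl_add_cons (l : List String) (s : List String) (h : String) (hh : h ∉ s) :
    l.foldl PySem.Set.add (h :: s) = h :: (l.filter (fun x => x ≠ h)).foldl PySem.Set.add s := by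
  induction l generalizing s with
  | nil => rfl
  | cons a t ih =>
    by_cases hah : a = h
    · subst hah
      simp [PySem.Set.add, PySem.Set.contains, ih s hh]
    · have h2 : PySem.Set.add (h :: s) a = h :: PySem.Set.add s a := by
        by_cases ha : a ∈ s
        · simp [PySem.Set.add, PySem.Set.contains, ha, hah]
        · simp [PySem.Set.add, PySem.Set.contains, ha, hah]
      have h3 : h ∉ PySem.Set.add s a := by
        simp only [PySem.Set.add, PySem.Set.contains]
        split
        · exact hh
        · simp [hh, Ne.symm hah]
      simp [hah, h2, ih _ h3]

-- proof-only helper: the recursive form of B's dedup loop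
def pvDedupRec : List String → List String
  | [] => []
  | h :: t => h :: pvDedupRec (t.filter (fun x => x ≠ h))
termination_by l => l.length
decreasing_by
  simp only [List.length_cons, List.length_unattach]
  exact Nat.lt_succ_of_le (le_trans (List.length_filter_le _ _) (by simp))

def pvDedupRec_cons (h : String) (t : List String) :
    pvDedupRec (h :: t) = h :: pvDedupRec (t.filter (fun x => x ≠ h)) := by
  simp [pvDedupRec]

-- B's accumulator loop in terms of the recursive form
theorem dedupLoop_eq_aux (n : ℕ) : ∀ (l out : List String), l.length ≤ n →
    pvDedupLoop out l = out ++ pvDedupRec l := by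
  induction n with
  | zero =>
    intro l out hl
    have : l = [] := List.eq_nil_of_length_eq_zero (Nat.le_zero.mp hl)
    subst this
    simp [pvDedupLoop, pvDedupRec]
  | succ n ih =>
    intro l out hl
    cases l with
    | nil => simp [pvDedupLoop, pvDedupRec]
    | cons h t =>
      rw [pvDedupRec_cons]
      have h1 : pvDedupLoop out (h :: t) = pvDedupLoop (out ++ [h]) (t.filter (fun x => x ≠ h)) := by
        simp [pvDedupLoop]
      rw [h1, ih _ _ (le_trans (List.length_filter_le _ _) (Nat.le_of_succ_le_succ hl))]
      simp

theorem dedupLoop_spec (l : List String) : pvDedupLoop [] l = pvDedupRec l := by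
  simpa using dedupLoop_eq_aux l.length l [] le_rfl

-- B's recursive dedup computes list(dict.fromkeys(...))
theorem dedupRec_spec_aux (n : ℕ) : ∀ (l : List String), l.length ≤ n → pvDedupRec l = PySem.List.dedup l := by
  induction n with
  | zero =>
    intro l hl
    have : l = [] := List.eq_nil_of_length_eq_zero (Nat.le_zero.mp hl)
    subst this
    simp [pvDedupRec, PySem.List.dedup_eq_ofList, PySem.Set.ofList_eq_foldl]
  | succ n ih =>
    intro l hl
    cases l with
    | nil => simp [pvDedupRec, PySem.List.dedup_eq_ofList, PySem.Set.ofList_eq_foldl]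
    | cons h t =>
      rw [pvDedupRec_cons,
        ih _ (le_trans (List.length_filter_le _ _) (Nat.le_of_succ_le_succ hl))]
      simp only [PySem.List.dedup_eq_ofList, PySem.Set.ofList_eq_foldl, List.foldl_cons]
      have h1 : PySem.Set.add ([] : List String) h = [h] := by
        simp [PySem.Set.add, PySem.Set.contains]
      rw [h1, foldl_add_cons t [] h (by simp)]

theorem dedupRec_spec (l : List String) : pvDedupRec l = PySem.List.dedup l :=
  dedupRec_spec_aux l.length l le_rfl

-- membership in A's triple-fold activity-type set, generalized over the start set
theorem mem_atys_aux (t : String) (plans : List (List (String × List (List (String × String))))) (s : PySem.Set String) :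
    (t ∈ plans.foldl (fun s plan =>
        (["morning", "afternoon", "evening"] : List String).foldl (fun s period =>
          (PySem.Dict.getD (PySem.Dict.mk plan) period []).foldl (fun s activity =>
            PySem.Set.add s (PySem.Dict.getD (PySem.Dict.mk activity) "type" "general")) s) s) s)
      ↔ t ∈ s ∨ ∃ a ∈ plans.flatMap (fun plan =>
            (["morning", "afternoon", "evening"] : List String).flatMap (fun period =>
              PySem.Dict.getD (PySem.Dict.mk plan) period [])),
          PySem.Dict.getD (PySem.Dict.mk a) "type" "general" = t := by
  induction plans generalizing s with
  | nil => simp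
  | cons plan rest ih =>
    rw [List.foldl_cons, ih]
    simp only [List.flatMap_cons, List.mem_append, List.foldl_cons, List.foldl_nil,
      PySem.Set.mem_foldl_add, List.flatMap_nil, List.append_nil]
    constructor
    · rintro ((((h | ⟨a, ha, rfl⟩) | ⟨a, ha, rfl⟩) | ⟨a, ha, rfl⟩) | ⟨a, ha, h⟩)
      · exact Or.inl h
      · exact Or.inr ⟨a, Or.inl (Or.inl ha), rfl⟩
      · exact Or.inr ⟨a, Or.inl (Or.inr (Or.inl ha)), rfl⟩
      · exact Or.inr ⟨a, Or.inl (Or.inr (Or.inr ha)), rfl⟩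
      · exact Or.inr ⟨a, Or.inr ha, h⟩
    · rintro (h | ⟨a, (ha | ha | ha) | ha, h⟩)
      · exact Or.inl (Or.inl (Or.inl (Or.inl h)))
      · exact Or.inl (Or.inl (Or.inl (Or.inr ⟨a, ha, h.symm⟩)))
      · exact Or.inl (Or.inl (Or.inr ⟨a, ha, h.symm⟩))
      · exact Or.inl (Or.inr ⟨a, ha, h.symm⟩)
      · exact Or.inr ⟨a, ha, h⟩

-- B's inner flag fold over one activity list
theorem flag_fold_acts (l : List (List (String × String))) (st : Bool × Bool) :
    l.foldl (fun (st : Bool × Bool) a =>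
        let t := PySem.Dict.getD (PySem.Dict.mk a) "type" "general"
        (st.1 || t == "cultural", st.2 || (t == "outdoor" || t == "sightseeing"))) st
      = (st.1 || l.any (fun a => PySem.Dict.getD (PySem.Dict.mk a) "type" "general" == "cultural"),
         st.2 || l.any (fun a => PySem.Dict.getD (PySem.Dict.mk a) "type" "general" == "outdoor"
                || PySem.Dict.getD (PySem.Dict.mk a) "type" "general" == "sightseeing")) := by
  induction l generalizing st with
  | nil => simp
  | cons a t ih => simp [ih, Bool.or_assoc]

-- the three-period fold over one plan
theorem flag_fold_plan (plan : List (String × List (List (String × String)))) (st : Bool × Bool) :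
    (["morning", "afternoon", "evening"] : List String).foldl (fun st period =>
        (PySem.Dict.getD (PySem.Dict.mk plan) period []).foldl (fun (st : Bool × Bool) a =>
          let t := PySem.Dict.getD (PySem.Dict.mk a) "type" "general"
          (st.1 || t == "cultural", st.2 || (t == "outdoor" || t == "sightseeing"))) st) st
      = (st.1 || ((["morning", "afternoon", "evening"] : List String).flatMap (fun period =>
              PySem.Dict.getD (PySem.Dict.mk plan) period [])).any
            (fun a => PySem.Dict.getD (PySem.Dict.mk a) "type" "general" == "cultural"),
         st.2 || ((["morning", "afternoon", "evening"] : List String).flatMap (fun period =>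
              PySem.Dict.getD (PySem.Dict.mk plan) period [])).any
            (fun a => PySem.Dict.getD (PySem.Dict.mk a) "type" "general" == "outdoor"
                || PySem.Dict.getD (PySem.Dict.mk a) "type" "general" == "sightseeing")) := by
  rw [List.foldl_cons, List.foldl_cons, List.foldl_cons, List.foldl_nil,
    flag_fold_acts, flag_fold_acts, flag_fold_acts]
  simp [Bool.or_assoc]

-- B's full flag fold = any() over the flattened activities
theorem flag_fold_spec (plans : List (List (String × List (List (String × String))))) (st : Bool × Bool) :
    plans.foldl (fun st plan =>
        (["morning", "afternoon", "evening"] : List String).foldl (fun st period =>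
          (PySem.Dict.getD (PySem.Dict.mk plan) period []).foldl (fun (st : Bool × Bool) a =>
            let t := PySem.Dict.getD (PySem.Dict.mk a) "type" "general"
            (st.1 || t == "cultural", st.2 || (t == "outdoor" || t == "sightseeing"))) st) st) st
      = (st.1 || (plans.flatMap (fun plan =>
            (["morning", "afternoon", "evening"] : List String).flatMap (fun period =>
              PySem.Dict.getD (PySem.Dict.mk plan) period []))).any
            (fun a => PySem.Dict.getD (PySem.Dict.mk a) "type" "general" == "cultural"),
         st.2 || (plans.flatMap (fun plan =>
            (["morning", "afternoon", "evening"] : List String).flatMap (fun period =>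
              PySem.Dict.getD (PySem.Dict.mk plan) period []))).any
            (fun a => PySem.Dict.getD (PySem.Dict.mk a) "type" "general" == "outdoor"
                || PySem.Dict.getD (PySem.Dict.mk a) "type" "general" == "sightseeing")) := by
  induction plans generalizing st with
  | nil => simp
  | cons plan rest ih =>
    rw [List.foldl_cons, flag_fold_plan, ih]
    simp [Bool.or_assoc]

-- align a decidable-Prop if with the Bool if it is equivalent to
theorem if_prop_bool {α : Type} (c : Prop) [Decidable c] (b : Bool) (hcb : c ↔ b = true) (x y : α) :
    (if c then x else y) = (if b then x else y) := by
  by_cases hc : c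
  · simp [hc, hcb.mp hc]
  · have : b = false := by
      cases b
      · rfl
      · exact absurd (hcb.mpr rfl) hc
    simp [hc, this]

-- ===== VERDICT (by name: the statement is the Claim_ definition above) =====
theorem create_packing_list_py_spec : Claim_equal_create_packing_list_py := by
  intro wd dp _
  unfold Spec_create_packing_list_py create_packing_list_py create_packing_list_py_alt
  simp only [dedup_loop_spec, dedupLoop_spec, dedupRec_spec, flag_fold_spec, Bool.false_or]
  congr 1
  have hc : ("cultural" ∈ dp.foldl (fun s plan =>
        (["morning", "afternoon", "evening"] : List String).foldl (fun s period =>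
          (PySem.Dict.getD (PySem.Dict.mk plan) period []).foldl (fun s activity =>
            PySem.Set.add s (PySem.Dict.getD (PySem.Dict.mk activity) "type" "general")) s) s) PySem.Set.empty)
      ↔ ((dp.flatMap (fun plan =>
            (["morning", "afternoon", "evening"] : List String).flatMap (fun period =>
              PySem.Dict.getD (PySem.Dict.mk plan) period []))).any
          (fun a => PySem.Dict.getD (PySem.Dict.mk a) "type" "general" == "cultural")) = true := by
    rw [mem_atys_aux]
    simp only [PySem.Set.empty, List.not_mem_nil, false_or, List.any_eq_true, List.mem_flatMap,
      List.flatMap_cons, List.flatMap_nil, List.append_nil, List.mem_append, beq_iff_eq]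
  have hw : (("outdoor" ∈ dp.foldl (fun s plan =>
        (["morning", "afternoon", "evening"] : List String).foldl (fun s period =>
          (PySem.Dict.getD (PySem.Dict.mk plan) period []).foldl (fun s activity =>
            PySem.Set.add s (PySem.Dict.getD (PySem.Dict.mk activity) "type" "general")) s) s) PySem.Set.empty)
      ∨ ("sightseeing" ∈ dp.foldl (fun s plan =>
        (["morning", "afternoon", "evening"] : List String).foldl (fun s period =>
          (PySem.Dict.getD (PySem.Dict.mk plan) period []).foldl (fun s activity =>
            PySem.Set.add s (PySem.Dict.getD (PySem.Dict.mk activity) "type" "general")) s) s) PySem.Set.empty))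
      ↔ ((dp.flatMap (fun plan =>
            (["morning", "afternoon", "evening"] : List String).flatMap (fun period =>
              PySem.Dict.getD (PySem.Dict.mk plan) period []))).any
          (fun a => PySem.Dict.getD (PySem.Dict.mk a) "type" "general" == "outdoor"
              || PySem.Dict.getD (PySem.Dict.mk a) "type" "general" == "sightseeing")) = true := by
    rw [mem_atys_aux, mem_atys_aux]
    simp only [PySem.Set.empty, List.not_mem_nil, false_or, List.any_eq_true, List.mem_flatMap,
      List.flatMap_cons, List.flatMap_nil, List.append_nil, List.mem_append, Bool.or_eq_true,
      beq_iff_eq]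
    constructor
    · rintro (⟨a, ha, h⟩ | ⟨a, ha, h⟩)
      · exact ⟨a, ha, Or.inl h⟩
      · exact ⟨a, ha, Or.inr h⟩
    · rintro ⟨a, ha, h | h⟩
      · exact Or.inl ⟨a, ha, h⟩
      · exact Or.inr ⟨a, ha, h⟩
  rw [if_prop_bool _ _ hc, if_prop_bool _ _ hw]
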